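-- pv_equiv track=rewrite | github.com/tongosu/ddonilang | tests/run_seamgrim_console_control_markup_v2_check.py | _prefix_conflicts
-- ===== SOURCE A (Python) =====
-- def _prefix_conflicts(names: list[str]) -> list[tuple[str, str]]:
--     unique = sorted(set(names), key=lambda value: (len(value), value))
--     conflicts: list[tuple[str, str]] = []
--     for idx, left in enumerate(unique):
--         for right in unique[idx + 1 :]:
--             if right.startswith(left):
--                 conflicts.append((left, right))
--     return conflicts
-- ===== SOURCE B (Python) =====
-- def _prefix_conflicts(names: list[str]) -> list[tuple[str, str]]:
--     unique = set(names)
--     pairs: list[tuple[str, str]] = []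
--     for name in unique:
--         for cut in range(len(name)):
--             head = name[:cut]
--             if head in unique:
--                 pairs.append((head, name))
--     return sorted(pairs, key=lambda p: (len(p[0]), p[0], len(p[1]), p[1]))
-- ===== Notes on version B (the rewrite author's own statement) =====
-- stated objective: faster
-- what changed: A compares every unique name against every later unique name with startswith; B enumerates each name's proper prefixes, tests them against a hash set of the names, and sorts the collected pairs once by the (len, value) pair key.
import Mathlib
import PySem

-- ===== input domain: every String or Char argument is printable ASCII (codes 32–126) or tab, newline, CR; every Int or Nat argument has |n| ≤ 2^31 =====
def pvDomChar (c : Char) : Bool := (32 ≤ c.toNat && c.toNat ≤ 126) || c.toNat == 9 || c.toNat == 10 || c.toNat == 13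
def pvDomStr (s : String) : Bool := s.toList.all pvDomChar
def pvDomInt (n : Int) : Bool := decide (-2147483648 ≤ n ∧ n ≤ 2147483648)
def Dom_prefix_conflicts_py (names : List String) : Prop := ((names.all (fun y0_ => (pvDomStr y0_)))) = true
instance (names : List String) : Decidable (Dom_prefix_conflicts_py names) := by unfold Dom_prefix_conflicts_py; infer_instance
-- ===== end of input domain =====

-- B replaces A's quadratic all-pairs scan by enumerating each name's proper prefixes against a hash set,
-- then sorting the collected pairs once; same return value, no side effects.


-- ===== PORT A =====
-- Python tuple key (len(value), value) is the lexicographic order, ported as toLex into Lex (Int × String)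
def prefix_conflicts_py (names : List String) : List (String × String) :=
  let unique := PySem.List.sorted (PySem.Set.ofList names) (fun value => toLex (PySem.Str.len value, value))
  (PySem.List.enumerate unique).foldl
    (fun conflicts p =>
      (PySem.List.slice unique (some (p.1 + 1))).foldl
        (fun conflicts right =>
          if PySem.Str.startswith right p.2 then conflicts ++ [(p.2, right)] else conflicts)
        conflicts)
    []

-- ===== PORT B =====
def prefix_conflicts_py_alt (names : List String) : List (String × String) :=
  let unique := PySem.Set.ofList names
  let pairs := unique.foldl
    (fun pairs name =>
      (PySem.List.pyRange 0 (PySem.Str.len name)).foldl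
        (fun pairs cut =>
          let head := PySem.Str.slice name none (some cut)
          if PySem.Set.contains unique head then pairs ++ [(head, name)] else pairs)
        pairs)
    []
  PySem.List.sorted pairs
    (fun p => toLex (toLex (PySem.Str.len p.1, p.1), toLex (PySem.Str.len p.2, p.2)))

-- ===== PRECONDITION & SPEC =====
def Spec_prefix_conflicts_py (names : List String) (out : List (String × String)) : Prop := out = prefix_conflicts_py_alt names
instance (names : List String) (out : List (String × String)) : Decidable (Spec_prefix_conflicts_py names out) := by unfold Spec_prefix_conflicts_py; infer_instance

-- ===== CLAIM (what is proved, stated in full; the proofs are below) =====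
def Claim_equal_prefix_conflicts_py : Prop := ∀ (names : List String), Dom_prefix_conflicts_py names → Spec_prefix_conflicts_py names (prefix_conflicts_py names)

-- ===== LEMMAS AND PROOFS =====

-- the sort keys of the two ports, named for the proofs
def pvKS (v : String) : Lex (Int × String) := toLex (PySem.Str.len v, v)
def pvKP (p : String × String) : Lex (Lex (Int × String) × Lex (Int × String)) :=
  toLex (pvKS p.1, pvKS p.2)

-- recursive description of A's nested loops over the sorted unique list
def pvApairs : List String → List (String × String)
  | [] => []
  | x :: t => (t.filter (fun r => PySem.Str.startswith r x)).map (fun r => (x, r)) ++ pvApairs t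

lemma pvKS_lt_of_proper_prefix {x r : String} (hp : x.toList <+: r.toList) (hne : x ≠ r) :
    pvKS x < pvKS r := by
  have hlen : x.toList.length < r.toList.length := by
    rcases lt_or_eq_of_le hp.length_le with h | h
    · exact h
    · exact absurd (String.toList_inj.mp (hp.eq_of_length h)) hne
  simp only [pvKS, Prod.Lex.lt_iff, PySem.Str.len_eq, ofLex_toLex]
  left; exact_mod_cast hlen

lemma pvKS_inj {a b : String} (h : pvKS a = pvKS b) : a = b := by
  have := congrArg (fun k => (ofLex k).2) h
  simpa [pvKS] using this

lemma pvKP_lt_left {a b : String × String} (h : pvKS a.1 < pvKS b.1) : pvKP a < pvKP b := by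
  rw [pvKP, pvKP, Prod.Lex.lt_iff]
  exact Or.inl h

lemma pvKP_lt_right {a b : String × String} (h1 : a.1 = b.1) (h2 : pvKS a.2 < pvKS b.2) :
    pvKP a < pvKP b := by
  rw [pvKP, pvKP, Prod.Lex.lt_iff]
  exact Or.inr ⟨by rw [h1]; rfl, h2⟩

-- A's outer loop (after rewriting the inner append-if loop), generalized over the suffix position
lemma pvLoopA (u : List String) (s : Nat) (acc : List (String × String)) :
    (PySem.List.enumerate (u.drop s) (s : Int)).foldl
      (fun conflicts p =>
        conflicts ++ (List.filter (fun x => PySem.Str.startswith x p.2)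
            (PySem.List.slice u (some (p.1 + 1)))).map (Prod.mk p.2))
      acc = acc ++ pvApairs (u.drop s) := by
  by_cases hs : s < u.length
  · rw [List.drop_eq_getElem_cons hs, PySem.List.enumerate_cons, List.foldl_cons]
    have hsl : PySem.List.slice u (some ((s : Int) + 1)) = u.drop (s + 1) := by
      have h := PySem.List.slice_from u (a := (s : Int) + 1) (by positivity)
      rw [h]; norm_num
    simp only [hsl]
    have hc : (s : Int) + 1 = ((s + 1 : Nat) : Int) := by push_cast; ring
    rw [hc, pvLoopA u (s + 1)]
    simp [pvApairs, List.append_assoc]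
  · rw [List.drop_eq_nil_of_le (by omega)]
    simp [PySem.List.enumerate, pvApairs]
termination_by u.length - s

lemma pvA_eq (names : List String) :
    prefix_conflicts_py names = pvApairs (PySem.List.sorted (PySem.Set.ofList names) pvKS) := by
  unfold prefix_conflicts_py
  rw [show (fun value => toLex (PySem.Str.len value, value)) = pvKS from rfl]
  simp only [PySem.List.foldl_append_if]
  simpa using pvLoopA (PySem.List.sorted (PySem.Set.ofList names) pvKS) 0 []

lemma pvApairs_left_mem {u : List String} {p : String × String} (hp : p ∈ pvApairs u) : p.1 ∈ u := by
  induction u with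
  | nil => simp [pvApairs] at hp
  | cons x t ih =>
    simp only [pvApairs, List.mem_append, List.mem_map, List.mem_filter] at hp
    rcases hp with ⟨r, _, rfl⟩ | h
    · simp
    · simp [ih h]

lemma pvApairs_pairwise {u : List String} (hs : u.Pairwise (fun a b => pvKS a < pvKS b)) :
    (pvApairs u).Pairwise (fun a b => pvKP a < pvKP b) := by
  induction u with
  | nil => simp [pvApairs]
  | cons y t ih =>
    rw [pvApairs, List.pairwise_append]
    refine ⟨?_, ih hs.of_cons, ?_⟩
    · rw [List.pairwise_map]
      refine List.Pairwise.imp ?_ ((hs.of_cons).filter (fun r => PySem.Str.startswith r y))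
      intro a b h
      exact pvKP_lt_right rfl h
    · rintro a ha b hb
      obtain ⟨r', hr', rfl⟩ := List.mem_map.mp ha
      have hb1 : b.1 ∈ t := pvApairs_left_mem hb
      exact pvKP_lt_left (List.rel_of_pairwise_cons hs hb1)

lemma pvMem_apairs {u : List String} (hs : u.Pairwise (fun a b => pvKS a < pvKS b))
    {x r : String} :
    (x, r) ∈ pvApairs u ↔ x ∈ u ∧ r ∈ u ∧ x.toList <+: r.toList ∧ x ≠ r := by
  induction u with
  | nil => simp [pvApairs]
  | cons y t ih =>
    have hnd : y ∉ t := by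
      intro hm
      exact lt_irrefl _ (List.rel_of_pairwise_cons hs hm)
    have ht := hs.of_cons
    simp only [pvApairs, List.mem_append, List.mem_map, List.mem_filter, ih ht, List.mem_cons]
    constructor
    · rintro (⟨r', ⟨hr't, hsw⟩, heq⟩ | ⟨hx, hr, hp, hne⟩)
      · injection heq with h1 h2
        subst h1; subst h2
        rw [PySem.Str.startswith_eq] at hsw
        refine ⟨Or.inl rfl, Or.inr hr't, (PySem.Chars.startswith_iff _ _).mp hsw, ?_⟩
        rintro rfl
        exact hnd hr't
      · exact ⟨Or.inr hx, Or.inr hr, hp, hne⟩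
    · rintro ⟨hx, hr, hp, hne⟩
      rcases hx with rfl | hx
      · left
        rcases hr with rfl | hr
        · exact absurd rfl hne
        · refine ⟨r, ⟨hr, ?_⟩, rfl⟩
          rw [PySem.Str.startswith_eq]
          exact (PySem.Chars.startswith_iff _ _).mpr hp
      · right
        rcases hr with rfl | hr
        · exfalso
          have h1 : pvKS x < pvKS r := pvKS_lt_of_proper_prefix hp hne
          have h2 : pvKS r < pvKS x := List.rel_of_pairwise_cons hs hx
          exact lt_irrefl _ (h1.trans h2)
        · exact ⟨hx, hr, hp, hne⟩

-- a proper prefix is exactly a slice name[:cut] with 0 ≤ cut < len(name)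
lemma pvPrefix_iff (x r : String) :
    (∃ cut : Int, (0 ≤ cut ∧ cut < PySem.Str.len r) ∧ x = PySem.Str.slice r none (some cut)) ↔
      (x.toList <+: r.toList ∧ x ≠ r) := by
  constructor
  · rintro ⟨cut, ⟨h0, hlt⟩, rfl⟩
    rw [PySem.Str.len_eq] at hlt
    have htl : (PySem.Str.slice r none (some cut)).toList = r.toList.take cut.toNat := by
      rw [PySem.Str.toList_slice, PySem.Chars.slice_eq_listSlice, PySem.List.slice_to _ h0]
    have hcut : cut.toNat < r.toList.length := by omega
    refine ⟨htl ▸ List.take_prefix _ _, ?_⟩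
    intro heq
    have h2 := congrArg (fun s => s.toList.length) heq
    simp only [htl, List.length_take] at h2
    omega
  · rintro ⟨hp, hne⟩
    have hlen : x.toList.length < r.toList.length := by
      rcases lt_or_eq_of_le hp.length_le with h | h
      · exact h
      · exact absurd (String.toList_inj.mp (hp.eq_of_length h)) hne
    refine ⟨(x.toList.length : Int), ⟨by positivity, by rw [PySem.Str.len_eq]; exact_mod_cast hlen⟩, ?_⟩
    apply String.toList_inj.mp
    rw [PySem.Str.toList_slice, PySem.Chars.slice_eq_listSlice, PySem.List.slice_to _ (by positivity)]
    simpa using (List.prefix_iff_eq_take.mp hp)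

-- B's raw pair list as a flatMap
lemma pvB_pairs (names : List String) :
    (PySem.Set.ofList names).foldl
      (fun pairs name =>
        (PySem.List.pyRange 0 (PySem.Str.len name)).foldl
          (fun pairs cut =>
            let head := PySem.Str.slice name none (some cut)
            if PySem.Set.contains (PySem.Set.ofList names) head then pairs ++ [(head, name)] else pairs)
          pairs)
      [] =
    (PySem.Set.ofList names).flatMap (fun name =>
      ((PySem.List.pyRange 0 (PySem.Str.len name)).filter
          (fun cut => PySem.Set.contains (PySem.Set.ofList names) (PySem.Str.slice name none (some cut)))).map
        (fun cut => (PySem.Str.slice name none (some cut), name))) := by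
  rw [show (fun pairs name =>
        (PySem.List.pyRange 0 (PySem.Str.len name)).foldl
          (fun pairs cut =>
            let head := PySem.Str.slice name none (some cut)
            if PySem.Set.contains (PySem.Set.ofList names) head then pairs ++ [(head, name)] else pairs)
          pairs)
      = (fun (pairs : List (String × String)) name => pairs ++
          ((PySem.List.pyRange 0 (PySem.Str.len name)).filter
            (fun cut => PySem.Set.contains (PySem.Set.ofList names) (PySem.Str.slice name none (some cut)))).map
          (fun cut => (PySem.Str.slice name none (some cut), name))) from by
    funext pairs name
    exact PySem.List.foldl_append_if _ _ _ _]
  rw [PySem.List.foldl_append_eq_flatMap]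
  rfl

lemma pvSliceLen (r : String) (cut : Int) (h0 : 0 ≤ cut) (hlt : cut < PySem.Str.len r) :
    (PySem.Str.slice r none (some cut)).toList.length = cut.toNat := by
  rw [PySem.Str.len_eq] at hlt
  rw [PySem.Str.toList_slice, PySem.Chars.slice_eq_listSlice, PySem.List.slice_to _ h0]
  rw [List.length_take]; omega

lemma pvQ_nodup (names : List String) :
    ((PySem.Set.ofList names).flatMap (fun name =>
      ((PySem.List.pyRange 0 (PySem.Str.len name)).filter
          (fun cut => PySem.Set.contains (PySem.Set.ofList names) (PySem.Str.slice name none (some cut)))).map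
        (fun cut => (PySem.Str.slice name none (some cut), name)))).Nodup := by
  rw [List.nodup_flatMap]
  constructor
  · intro name hname
    refine List.Nodup.map_on ?_ ((PySem.List.nodup_pyRange_one 0 (PySem.Str.len name)).filter _)
    intro c1 h1 c2 h2 heq
    rw [List.mem_filter] at h1 h2
    have m1 := PySem.List.mem_pyRange_one.mp h1.1
    have m2 := PySem.List.mem_pyRange_one.mp h2.1
    have := congrArg (fun p => p.1.toList.length) heq
    simp only [pvSliceLen name c1 m1.1 m1.2, pvSliceLen name c2 m2.1 m2.2] at this
    omega
  · refine (PySem.Set.nodup_ofList names).imp ?_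
    intro a b hne p hp hq
    obtain ⟨c1, _, rfl⟩ := List.mem_map.mp hp
    obtain ⟨c2, _, h2⟩ := List.mem_map.mp hq
    exact hne (congrArg Prod.snd h2).symm

lemma pvMem_Q (names : List String) {x r : String} :
    (x, r) ∈ (PySem.Set.ofList names).flatMap (fun name =>
      ((PySem.List.pyRange 0 (PySem.Str.len name)).filter
          (fun cut => PySem.Set.contains (PySem.Set.ofList names) (PySem.Str.slice name none (some cut)))).map
        (fun cut => (PySem.Str.slice name none (some cut), name))) ↔
      x ∈ names ∧ r ∈ names ∧ x.toList <+: r.toList ∧ x ≠ r := by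
  rw [List.mem_flatMap]
  constructor
  · rintro ⟨name, hname, hmem⟩
    obtain ⟨cut, hcut, heq⟩ := List.mem_map.mp hmem
    rw [List.mem_filter] at hcut
    obtain ⟨hrange, hcontains⟩ := hcut
    obtain ⟨hm1, hm2⟩ := PySem.List.mem_pyRange_one.mp hrange
    injection heq with e1 e2
    subst e2
    have hx : x ∈ names := by
      rw [e1] at hcontains
      exact (PySem.Set.mem_ofList names _).mp ((PySem.Set.contains_iff _ _).mp hcontains)
    have hpr := (pvPrefix_iff x name).mp ⟨cut, ⟨hm1, hm2⟩, e1.symm⟩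
    exact ⟨hx, (PySem.Set.mem_ofList names name).mp hname, hpr.1, hpr.2⟩
  · rintro ⟨hx, hr, hp, hne⟩
    obtain ⟨cut, ⟨h0, hlt⟩, heq⟩ := (pvPrefix_iff x r).mpr ⟨hp, hne⟩
    refine ⟨r, (PySem.Set.mem_ofList names r).mpr hr, List.mem_map.mpr ⟨cut, ?_, by rw [← heq]⟩⟩
    rw [List.mem_filter]
    refine ⟨PySem.List.mem_pyRange_one.mpr ⟨h0, hlt⟩, ?_⟩
    rw [← heq]
    exact (PySem.Set.contains_iff _ _).mpr ((PySem.Set.mem_ofList names x).mpr hx)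

lemma pvU_pairwise (names : List String) :
    (PySem.List.sorted (PySem.Set.ofList names) pvKS).Pairwise (fun a b => pvKS a < pvKS b) := by
  have h1 := PySem.List.sorted_pairwise (PySem.Set.ofList names) pvKS
  have h2 : (PySem.List.sorted (PySem.Set.ofList names) pvKS).Nodup :=
    ((PySem.List.sorted_perm (PySem.Set.ofList names) pvKS false).symm.nodup) (PySem.Set.nodup_ofList names)
  refine (h1.and h2).imp ?_
  rintro a b ⟨hle, hne⟩
  exact lt_of_le_of_ne hle (fun h => hne (pvKS_inj h))

lemma pvB_eq (names : List String) :
    prefix_conflicts_py_alt names =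
      PySem.List.sorted
        ((PySem.Set.ofList names).flatMap (fun name =>
          ((PySem.List.pyRange 0 (PySem.Str.len name)).filter
              (fun cut => PySem.Set.contains (PySem.Set.ofList names) (PySem.Str.slice name none (some cut)))).map
            (fun cut => (PySem.Str.slice name none (some cut), name))))
        pvKP := by
  have h : prefix_conflicts_py_alt names =
      PySem.List.sorted
        ((PySem.Set.ofList names).foldl
          (fun pairs name =>
            (PySem.List.pyRange 0 (PySem.Str.len name)).foldl
              (fun pairs cut =>
                let head := PySem.Str.slice name none (some cut)
                if PySem.Set.contains (PySem.Set.ofList names) head then pairs ++ [(head, name)] else pairs)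
              pairs)
          [])
        pvKP := rfl
  rw [h, pvB_pairs]

-- ===== VERDICT (by name: the statement is the Claim_ definition above) =====
theorem prefix_conflicts_py_spec : Claim_equal_prefix_conflicts_py := by
  intro names _
  unfold Spec_prefix_conflicts_py
  rw [pvA_eq, pvB_eq]
  refine (PySem.List.sorted_eq_of_perm_of_pairwise_lt _ _ pvKP ?_ ?_).symm
  · refine (List.perm_ext_iff_of_nodup ?_ (pvQ_nodup names)).mpr ?_
    · exact (pvApairs_pairwise (pvU_pairwise names)).imp
        (fun h => by rintro rfl; exact lt_irrefl _ h)
    · rintro ⟨x, r⟩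
      rw [pvMem_apairs (pvU_pairwise names), pvMem_Q]
      simp [PySem.List.mem_sorted, PySem.Set.mem_ofList]
  · exact pvApairs_pairwise (pvU_pairwise names)
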